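-- pv_equiv track=rewrite | github.com/sherpa18-glitch/followflow | app/instagram/follow.py | get_follow_summary
-- ===== SOURCE A (Python) =====
-- from typing import List, Dict, Optional
--
-- def get_follow_summary(results: List[Dict]) -> Dict:
--     """Compute summary statistics from follow results.
--
--     Args:
--         results: List of follow result dicts.
--
--     Returns:
--         Dict with total_sent, public_count, private_count, fail_count.
--     """
--     total = len(results)
--     success = [r for r in results if r["status"] == "SUCCESS"]
--     public_count = sum(1 for r in success if r.get("follow_type") == "public")
--     private_count = sum(1 for r in success if r.get("follow_type") == "private")
--     fail_count = total - len(success)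
--
--     return {
--         "total_sent": len(success),
--         "public_count": public_count,
--         "private_count": private_count,
--         "fail_count": fail_count,
--     }
-- ===== SOURCE B (Python) =====
-- def get_follow_summary(results):
--     """Single-pass summary: one loop over results maintaining three counters."""
--     success = 0
--     public_count = 0
--     private_count = 0
--     for r in results:
--         if r["status"] == "SUCCESS":
--             success += 1
--             ft = r.get("follow_type")
--             if ft == "public":
--                 public_count += 1
--             elif ft == "private":
--                 private_count += 1
--     return {
--         "total_sent": success,
--         "public_count": public_count,
--         "private_count": private_count,
--         "fail_count": len(results) - success,
--     }
-- ===== Notes on version B (the rewrite author's own statement) =====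
-- stated objective: simpler
-- what changed: Replaces A's intermediate success list plus two separate generator-sum passes with a single loop over results that maintains three counters and derives fail_count as len(results) - success.
import Mathlib
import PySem

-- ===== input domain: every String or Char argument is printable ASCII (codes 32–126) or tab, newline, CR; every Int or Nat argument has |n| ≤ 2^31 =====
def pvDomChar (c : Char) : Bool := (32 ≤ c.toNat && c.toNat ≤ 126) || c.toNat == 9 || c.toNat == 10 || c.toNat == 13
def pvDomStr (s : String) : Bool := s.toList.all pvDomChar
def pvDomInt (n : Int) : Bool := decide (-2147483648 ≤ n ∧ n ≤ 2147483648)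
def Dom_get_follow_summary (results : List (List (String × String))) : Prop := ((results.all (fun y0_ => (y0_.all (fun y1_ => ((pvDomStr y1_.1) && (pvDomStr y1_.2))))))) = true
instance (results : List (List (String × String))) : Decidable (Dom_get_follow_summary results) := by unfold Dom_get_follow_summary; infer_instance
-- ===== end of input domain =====

-- B is a single accumulation loop over results (three counters, fail derived by
-- subtraction) instead of A's intermediate success list plus two counting passes.
-- Pre_ excludes dicts missing the "status" key, where both Pythons raise KeyError.

-- ===== PORT A =====
-- r["status"]: under Pre_ the key is present, so getD "" is exact there.
def get_follow_summary (results : List (List (String × String))) : List (String × Int) :=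
  let total : Int := results.length
  let success := results.filter (fun r => (r.lookup "status").getD "" == "SUCCESS")
  let public_count : Int :=
    success.foldl (fun acc r => if r.lookup "follow_type" == some "public" then acc + 1 else acc) 0
  let private_count : Int :=
    success.foldl (fun acc r => if r.lookup "follow_type" == some "private" then acc + 1 else acc) 0
  let fail_count : Int := total - success.length
  [("total_sent", (success.length : Int)), ("public_count", public_count),
   ("private_count", private_count), ("fail_count", fail_count)]

-- ===== PORT B =====
def pvStepB (acc : Int × Int × Int) (r : List (String × String)) : Int × Int × Int :=
  if (r.lookup "status").getD "" == "SUCCESS" then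
    let ft := r.lookup "follow_type"
    (acc.1 + 1,
     acc.2.1 + (if ft == some "public" then 1 else 0),
     acc.2.2 + (if ft == some "private" then 1 else 0))
  else acc

def get_follow_summary_alt (results : List (List (String × String))) : List (String × Int) :=
  let acc := results.foldl pvStepB (0, 0, 0)
  [("total_sent", acc.1), ("public_count", acc.2.1),
   ("private_count", acc.2.2), ("fail_count", (results.length : Int) - acc.1)]

-- ===== PRECONDITION & SPEC =====
-- Pre_ excludes inputs where some dict has no "status" key: there both A and B raise KeyError.
def Pre_get_follow_summary (results : List (List (String × String))) : Prop :=
  ∀ r ∈ results, (r.lookup "status").isSome = true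
instance (results : List (List (String × String))) : Decidable (Pre_get_follow_summary results) := by
  unfold Pre_get_follow_summary; infer_instance
def pvWitness_get_follow_summary : (List (List (String × String))) :=
  [[("status", "SUCCESS"), ("follow_type", "public")], [("status", "FAIL")]]

def Spec_get_follow_summary (results : List (List (String × String))) (out : List (String × Int)) : Prop := out = get_follow_summary_alt results
instance (results : List (List (String × String))) (out : List (String × Int)) : Decidable (Spec_get_follow_summary results out) := by unfold Spec_get_follow_summary; infer_instance

-- ===== CLAIM (what is proved, stated in full; the proofs are below) =====
def Claim_equal_get_follow_summary : Prop := ∀ (results : List (List (String × String))), Dom_get_follow_summary results → Pre_get_follow_summary results → Spec_get_follow_summary results (get_follow_summary results)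

-- ===== LEMMAS AND PROOFS =====

-- B's fold, started at (a,b,c), adds the three filter-counts A computes.
theorem stepB_fold (l : List (List (String × String))) :
    ∀ a b c : Int, l.foldl pvStepB (a, b, c) =
      (a + ((l.filter (fun r => (r.lookup "status").getD "" == "SUCCESS")).length : Int),
       b + ((l.filter (fun r => ((r.lookup "status").getD "" == "SUCCESS") &&
              (r.lookup "follow_type" == some "public"))).length : Int),
       c + ((l.filter (fun r => ((r.lookup "status").getD "" == "SUCCESS") &&
              (r.lookup "follow_type" == some "private"))).length : Int)) := by
  induction l with
  | nil => simp
  | cons r t ih =>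
    intro a b c
    by_cases hs : ((r.lookup "status").getD "" == "SUCCESS") = true
    · simp only [List.foldl_cons, pvStepB, hs, if_true, List.filter_cons, Bool.true_and, ih]
      by_cases hp : (r.lookup "follow_type" == some "public") = true
      · have hq : (r.lookup "follow_type" == some "private") = false := by
          cases h : r.lookup "follow_type" <;> simp_all
        simp [hp, hq, Prod.ext_iff, List.length_cons]
        omega
      · by_cases hq : (r.lookup "follow_type" == some "private") = true <;>
          · simp [hp, hq, Prod.ext_iff, List.length_cons]
            omega
    · simp only [List.foldl_cons, pvStepB, hs, if_false, List.filter_cons, Bool.false_and,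
        Bool.false_eq_true, if_false, ih]

-- A's counting fold over the success list is the length of a further filter.
theorem count_fold (p : List (String × String) → Bool) (l : List (List (String × String))) :
    ∀ a : Int, l.foldl (fun acc r => if p r then acc + 1 else acc) a =
      a + ((l.filter p).length : Int) := by
  induction l with
  | nil => simp
  | cons r t ih =>
    intro a
    by_cases hp : p r = true
    · simp [hp, ih, List.length_cons]; omega
    · simp [hp, ih]

-- ===== VERDICT (by name: the statement is the Claim_ definition above) =====
theorem get_follow_summary_spec : Claim_equal_get_follow_summary := by
  intro results _ _
  show _ = _
  simp only [get_follow_summary, get_follow_summary_alt, stepB_fold, count_fold,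
    List.filter_filter, zero_add]
  simp [Bool.and_comm]
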